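-- pv_equiv track=rewrite | github.com/ibm-ecosystem-engineering/envizi-integration-hub-app | api/src/excelpro/ExcelProDataGiver.py | _find_suitable_uploaded_column
-- ===== SOURCE A (Python) =====
-- def _find_suitable_uploaded_column(uploaded_columns, column_to_find):
--     for mycolumn in uploaded_columns:
--         if mycolumn == column_to_find:
--             return mycolumn
--
--     for mycolumn in uploaded_columns:
--         if column_to_find in mycolumn:
--             return mycolumn
--
--     for mycolumn in uploaded_columns:
--         if mycolumn in column_to_find:
--             return mycolumn
--
--     return column_to_find
-- ===== SOURCE B (Python) =====
-- def _find_suitable_uploaded_column(uploaded_columns, column_to_find):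
--     first_substring = None
--     first_reverse = None
--     for mycolumn in uploaded_columns:
--         if mycolumn == column_to_find:
--             return mycolumn
--         if first_substring is None and column_to_find in mycolumn:
--             first_substring = mycolumn
--         if first_reverse is None and mycolumn in column_to_find:
--             first_reverse = mycolumn
--     if first_substring is not None:
--         return first_substring
--     if first_reverse is not None:
--         return first_reverse
--     return column_to_find
-- ===== Notes on version B (the rewrite author's own statement) =====
-- stated objective: alternative
-- what changed: Replaces A's three sequential scans of the list with a single pass that returns immediately on an exact match and records the first forward- and reverse-substring candidates, choosing among them after the loop.
import Mathlib
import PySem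

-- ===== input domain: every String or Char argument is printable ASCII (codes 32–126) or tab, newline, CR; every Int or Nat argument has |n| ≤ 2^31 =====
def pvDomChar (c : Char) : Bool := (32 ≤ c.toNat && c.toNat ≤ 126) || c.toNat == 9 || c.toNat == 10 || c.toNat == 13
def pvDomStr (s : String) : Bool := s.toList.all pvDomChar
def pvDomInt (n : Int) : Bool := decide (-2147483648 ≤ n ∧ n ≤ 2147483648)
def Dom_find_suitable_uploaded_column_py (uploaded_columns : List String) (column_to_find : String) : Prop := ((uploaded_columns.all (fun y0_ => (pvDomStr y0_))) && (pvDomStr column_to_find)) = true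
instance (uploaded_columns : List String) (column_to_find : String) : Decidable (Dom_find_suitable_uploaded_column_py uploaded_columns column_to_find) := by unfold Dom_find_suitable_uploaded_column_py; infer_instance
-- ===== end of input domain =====

-- ===== PORT A =====
-- B changes A's three sequential scans into one pass with two recorded candidates (alternative decomposition).
def find_suitable_uploaded_column_py (uploaded_columns : List String) (column_to_find : String) : String :=
  match uploaded_columns.find? (fun mycolumn => mycolumn == column_to_find) with
  | some c => c
  | none =>
    match uploaded_columns.find? (fun mycolumn => PySem.Str.isIn column_to_find mycolumn) with
    | some c => c
    | none =>
      match uploaded_columns.find? (fun mycolumn => PySem.Str.isIn mycolumn column_to_find) with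
      | some c => c
      | none => column_to_find

-- ===== PORT B =====
def pvAltLoop (column_to_find : String) (cs : List String)
    (first_substring first_reverse : Option String) : String :=
  match cs with
  | [] =>
    match first_substring with
    | some c => c
    | none =>
      match first_reverse with
      | some c => c
      | none => column_to_find
  | mycolumn :: rest =>
    if mycolumn == column_to_find then mycolumn
    else
      pvAltLoop column_to_find rest
        (if first_substring.isNone && PySem.Str.isIn column_to_find mycolumn then some mycolumn else first_substring)
        (if first_reverse.isNone && PySem.Str.isIn mycolumn column_to_find then some mycolumn else first_reverse)

def find_suitable_uploaded_column_py_alt (uploaded_columns : List String) (column_to_find : String) : String :=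
  pvAltLoop column_to_find uploaded_columns none none

-- ===== PRECONDITION & SPEC =====
def Spec_find_suitable_uploaded_column_py (uploaded_columns : List String) (column_to_find : String) (out : String) : Prop := out = find_suitable_uploaded_column_py_alt uploaded_columns column_to_find
instance (uploaded_columns : List String) (column_to_find : String) (out : String) : Decidable (Spec_find_suitable_uploaded_column_py uploaded_columns column_to_find out) := by unfold Spec_find_suitable_uploaded_column_py; infer_instance

-- ===== CLAIM (what is proved, stated in full; the proofs are below) =====
def Claim_equal_find_suitable_uploaded_column_py : Prop := ∀ (uploaded_columns : List String) (column_to_find : String), Dom_find_suitable_uploaded_column_py uploaded_columns column_to_find → Spec_find_suitable_uploaded_column_py uploaded_columns column_to_find (find_suitable_uploaded_column_py uploaded_columns column_to_find)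

-- ===== LEMMAS AND PROOFS =====
-- accumulator update vs. prepending to a find?: the recorded candidate absorbs the head
theorem pv_orElse_find (fs : Option String) (p : String → Bool) (c : String) (rest : List String) :
    (fs.orElse (fun _ => (c :: rest).find? p))
      = ((if fs.isNone && p c then some c else fs).orElse (fun _ => rest.find? p)) := by
  cases fs
  · simp only [List.find?, Option.isNone_none, Bool.true_and, Option.orElse_none]
    cases h : p c <;> simp [h]
  · simp

theorem pvAltLoop_eq (column_to_find : String) (cs : List String)
    (fs fr : Option String) :
    pvAltLoop column_to_find cs fs fr =
      match cs.find? (fun m => m == column_to_find) with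
      | some c => c
      | none =>
        match fs.orElse (fun _ => cs.find? (fun m => PySem.Str.isIn column_to_find m)) with
        | some c => c
        | none =>
          match fr.orElse (fun _ => cs.find? (fun m => PySem.Str.isIn m column_to_find)) with
          | some c => c
          | none => column_to_find := by
  induction cs generalizing fs fr with
  | nil => cases fs <;> cases fr <;> simp [pvAltLoop]
  | cons c rest ih =>
    by_cases h : (c == column_to_find) = true
    · simp [pvAltLoop, h, List.find?]
    · rw [pvAltLoop]
      simp only [h, Bool.false_eq_true, if_false]
      rw [ih]
      rw [← pv_orElse_find fs (fun m => PySem.Str.isIn column_to_find m) c rest,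
         ← pv_orElse_find fr (fun m => PySem.Str.isIn m column_to_find) c rest]
      simp [List.find?, h]

-- ===== VERDICT (by name: the statement is the Claim_ definition above) =====
theorem find_suitable_uploaded_column_py_spec : Claim_equal_find_suitable_uploaded_column_py := by
  intro uploaded_columns column_to_find _
  unfold Spec_find_suitable_uploaded_column_py find_suitable_uploaded_column_py find_suitable_uploaded_column_py_alt
  rw [pvAltLoop_eq]
  simp
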